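-- pv_equiv track=rewrite | github.com/mwibrow/vlnm | vlnm/plotting/style.py | get_group_styles
-- ===== SOURCE A (Python) =====
-- from typing import Any, Dict, List, Tuple, Union
--
-- def get_group_styles(
--         groups: List[str],
--         values: Tuple[Any],
--         vary: Dict[str, str],
--         style_maps: Dict[str, dict]) -> Dict[str, Any]:
--     """Get the style for a group of observations.
--
--     Parameters
--     ----------
--     groups:
--         The list of Dataframe columns used to split a Dataframe.
--     values:
--         The data values for a particular group. This will be the first
--         item in the tuple generated when iterating over a
--         `Dataframe.groupby` generator.
--     vary:
--         A dictionary mapping style properties onto Dataframe columns.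
--     style_maps:
--         Mappings for style properties from data values to graphical properties.
--
--     Returns
--     -------
--     :
--         The plotting styles for the group with the specified values.
--     """
--     if not groups or not values:
--         return {}
--     yrav = {}
--     for prop, column in vary.items():
--         yrav[column] = yrav.get(column, set())
--         yrav[column].add(prop)
--
--     style = {}
--     for column, value in zip(groups, values):
--         try:
--             for prop in yrav[column]:
--                 style_map = style_maps.get(prop)
--                 if style_map and value in style_map:
--                     style[prop] = style_map[value]
--         except KeyError:
--             pass
--     return style
-- ===== SOURCE B (Python) =====
-- def get_group_styles(groups, values, vary, style_maps):
--     """Same result as A, but as two stages: a flat comprehension collecting the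
--     (prop, graphic) events in A's traversal order, then one dict() build
--     (later duplicates overwrite, keeping the first position, like repeated
--     assignment)."""
--     if not groups or not values:
--         return {}
--     events = [
--         (prop, style_maps[prop][value])
--         for column, value in zip(groups, values)
--         for prop, col in vary.items()
--         if col == column and style_maps.get(prop) and value in style_maps[prop]
--     ]
--     return dict(events)
-- ===== Notes on version B (the rewrite author's own statement) =====
-- stated objective: simpler
-- what changed: Drops A's inverted column->props index (yrav) and its try/except and imperative dict mutation; B is a flat generator-style comprehension over zip(groups, values) x vary.items() producing (prop, style) events, collapsed by a single dict() construction.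
import Mathlib
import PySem

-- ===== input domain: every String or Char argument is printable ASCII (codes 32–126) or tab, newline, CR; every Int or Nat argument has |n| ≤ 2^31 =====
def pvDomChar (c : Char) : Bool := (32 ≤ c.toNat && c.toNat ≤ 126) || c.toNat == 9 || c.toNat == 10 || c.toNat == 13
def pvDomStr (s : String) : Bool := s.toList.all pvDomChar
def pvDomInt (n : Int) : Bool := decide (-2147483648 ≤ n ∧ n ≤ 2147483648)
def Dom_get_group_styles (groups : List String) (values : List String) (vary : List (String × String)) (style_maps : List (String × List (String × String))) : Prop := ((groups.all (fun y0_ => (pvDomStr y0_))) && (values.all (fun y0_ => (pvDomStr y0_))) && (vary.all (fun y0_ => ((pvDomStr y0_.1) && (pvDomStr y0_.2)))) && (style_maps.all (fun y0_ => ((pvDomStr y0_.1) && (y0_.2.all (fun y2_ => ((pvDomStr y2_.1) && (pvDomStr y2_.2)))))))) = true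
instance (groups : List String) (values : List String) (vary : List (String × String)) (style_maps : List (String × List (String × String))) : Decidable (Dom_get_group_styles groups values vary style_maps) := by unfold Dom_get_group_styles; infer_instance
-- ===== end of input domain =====

-- B replaces A's inverted column→props index (yrav), try/except and imperative dict mutation by a
-- flat comprehension of (prop, style) events followed by one dict() build: simpler, same result.
-- The dicts in the output are compared as Python dicts; A iterates a Python set (hash order), ported
-- here as PySem.Set (insertion order), which fixes one definite, Python-reachable ordering of items.

-- ===== PORT A =====
def get_group_styles (groups : List String) (values : List String) (vary : List (String × String)) (style_maps : List (String × List (String × String))) : List (String × String) :=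
  if groups = [] ∨ values = [] then []
  else
    let varyD : PySem.Dict String String := PySem.Dict.ofList vary
    let smD : PySem.Dict String (List (String × String)) := PySem.Dict.ofList style_maps
    -- yrav[column] = yrav.get(column, set()); yrav[column].add(prop)
    let yrav : PySem.Dict String (PySem.Set String) :=
      varyD.items.foldl
        (fun d pc => d.insert pc.2 (PySem.Set.add (d.getD pc.2 PySem.Set.empty) pc.1))
        PySem.Dict.empty
    let style : PySem.Dict String String :=
      (groups.zip values).foldl
        (fun st cv =>
          match yrav.get? cv.1 with      -- try: … except KeyError: pass
          | none => st
          | some props =>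
            props.foldl
              (fun st prop =>
                match smD.get? prop with -- style_map = style_maps.get(prop)
                | none => st
                | some m =>
                  let sm := PySem.Dict.ofList m
                  if sm.items ≠ [] then  -- `if style_map` truthiness
                    match sm.get? cv.2 with
                    | some v => st.insert prop v
                    | none => st
                  else st) st)
        PySem.Dict.empty
    style.items

-- ===== PORT B =====
def get_group_styles_alt (groups : List String) (values : List String) (vary : List (String × String)) (style_maps : List (String × List (String × String))) : List (String × String) :=
  if groups = [] ∨ values = [] then []
  else
    let smD : PySem.Dict String (List (String × String)) := PySem.Dict.ofList style_maps
    -- the comprehension: pairs (prop, style_maps[prop][value]) in traversal order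
    let events : List (String × String) :=
      (groups.zip values).flatMap (fun cv =>
        (PySem.Dict.ofList vary).items.filterMap (fun pc =>
          if pc.2 == cv.1 then
            (smD.get? pc.1).bind (fun m =>
              let sm := PySem.Dict.ofList m
              if sm.items ≠ [] then (sm.get? cv.2).map (fun v => (pc.1, v)) else none)
          else none))
    (PySem.Dict.ofList events).items   -- dict(events)

-- ===== PRECONDITION & SPEC =====
def Spec_get_group_styles (groups : List String) (values : List String) (vary : List (String × String)) (style_maps : List (String × List (String × String))) (out : List (String × String)) : Prop := out = get_group_styles_alt groups values vary style_maps
instance (groups : List String) (values : List String) (vary : List (String × String)) (style_maps : List (String × List (String × String))) (out : List (String × String)) : Decidable (Spec_get_group_styles groups values vary style_maps out) := by unfold Spec_get_group_styles; infer_instance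

-- ===== CLAIM (what is proved, stated in full; the proofs are below) =====
def Claim_equal_get_group_styles : Prop := ∀ (groups : List String) (values : List String) (vary : List (String × String)) (style_maps : List (String × List (String × String))), Dom_get_group_styles groups values vary style_maps → Spec_get_group_styles groups values vary style_maps (get_group_styles groups values vary style_maps)

-- ===== LEMMAS AND PROOFS =====

-- A fold of a column-guarded update over the pairs of `vary` is the fold of the update step over
-- exactly the props whose column matches, in order.
lemma foldl_guard_filter (f : PySem.Dict String String → String → PySem.Dict String String)
    (c : String) :
    ∀ (L : List (String × String)) (st : PySem.Dict String String),
      L.foldl (fun st pc => if pc.2 == c then f st pc.1 else st) st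
        = ((L.filter (fun pc => pc.2 == c)).map Prod.fst).foldl f st := by
  intro L
  induction L with
  | nil => intro st; rfl
  | cons a L ih =>
    intro st
    rw [List.foldl_cons, List.filter_cons]
    by_cases h : (a.2 == c) = true
    · rw [if_pos h, if_pos h, List.map_cons, List.foldl_cons]
      exact ih (f st a.1)
    · rw [if_neg h, if_neg h]
      exact ih st

-- A's inverted index `yrav`, built over pairs with distinct props, stores under each
-- column exactly the props of that column, in scan order.
lemma yrav_getD (c : String) :
    ∀ (L : List (String × String)) (d : PySem.Dict String (PySem.Set String)),
      (L.map Prod.fst).Nodup →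
      (∀ p ∈ L, ∀ c', p.1 ∉ d.getD c' PySem.Set.empty) →
      (L.foldl
          (fun d pc => d.insert pc.2 (PySem.Set.add (d.getD pc.2 PySem.Set.empty) pc.1))
          d).getD c PySem.Set.empty
        = d.getD c PySem.Set.empty ++ (L.filter (fun pc => pc.2 == c)).map Prod.fst := by
  intro L
  induction L with
  | nil => intro d _ _; simp
  | cons a L ih =>
    intro d hnd hfresh
    rw [List.map_cons, List.nodup_cons] at hnd
    have hadd : PySem.Set.add (d.getD a.2 PySem.Set.empty) a.1
        = d.getD a.2 PySem.Set.empty ++ [a.1] := by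
      have hnotmem : a.1 ∉ d.getD a.2 PySem.Set.empty :=
        hfresh a (by simp) a.2
      simp [PySem.Set.add, PySem.Set.contains]
      intro hmem
      exact absurd (by simpa using hmem) hnotmem
    have hfresh' : ∀ p ∈ L, ∀ c',
        p.1 ∉ (d.insert a.2 (PySem.Set.add (d.getD a.2 PySem.Set.empty) a.1)).getD c' PySem.Set.empty := by
      intro p hp c'
      rw [PySem.Dict.getD_insert]
      by_cases hc : c' = a.2
      · rw [if_pos hc, PySem.Set.mem_add]
        push Not
        constructor
        · exact hfresh p (by simp [hp]) a.2
        · intro heq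
          exact absurd (heq ▸ List.mem_map_of_mem hp) hnd.1
      · rw [if_neg hc]
        exact hfresh p (by simp [hp]) c'
    rw [List.foldl_cons, ih _ hnd.2 hfresh', PySem.Dict.getD_insert]
    by_cases hc : c = a.2
    · subst hc
      rw [if_pos rfl, hadd, List.filter_cons]
      simp
    · rw [if_neg hc, List.filter_cons]
      simp [Ne.symm hc]

-- the per-(column, value) step of A (index lookup, nested mutation loop) equals inserting,
-- in order, the events B's comprehension emits for that pair
lemma step_eq (vary : List (String × String))
    (smD : PySem.Dict String (List (String × String))) (cv : String × String)
    (st : PySem.Dict String String) :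
    (match ((PySem.Dict.ofList vary).items.foldl
        (fun d pc => d.insert pc.2 (PySem.Set.add (d.getD pc.2 PySem.Set.empty) pc.1))
        PySem.Dict.empty).get? cv.1 with
     | none => st
     | some props =>
       props.foldl
         (fun st prop =>
           match smD.get? prop with
           | none => st
           | some m =>
             let sm := PySem.Dict.ofList m
             if sm.items ≠ [] then
               match sm.get? cv.2 with
               | some v => st.insert prop v
               | none => st
             else st) st)
    = ((PySem.Dict.ofList vary).items.filterMap (fun pc =>
        if pc.2 == cv.1 then
          (smD.get? pc.1).bind (fun m =>
            let sm := PySem.Dict.ofList m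
            if sm.items ≠ [] then (sm.get? cv.2).map (fun v => (pc.1, v)) else none)
        else none)).foldl (fun st e => st.insert e.1 e.2) st := by
  set f : PySem.Dict String String → String → PySem.Dict String String :=
    fun st prop =>
      match smD.get? prop with
      | none => st
      | some m =>
        let sm := PySem.Dict.ofList m
        if sm.items ≠ [] then
          match sm.get? cv.2 with
          | some v => st.insert prop v
          | none => st
        else st with hf
  have hnd : ((PySem.Dict.ofList vary).items.map Prod.fst).Nodup :=
    PySem.Dict.nodup_keys_ofList vary
  have hchar := yrav_getD cv.1 (PySem.Dict.ofList vary).items PySem.Dict.empty hnd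
    (by intro p _ c'; simp)
  -- `Dict.empty.getD … ++ …` reduces away definitionally
  have hchar' : ((PySem.Dict.ofList vary).items.foldl
      (fun d pc => d.insert pc.2 (PySem.Set.add (d.getD pc.2 PySem.Set.empty) pc.1))
      PySem.Dict.empty).getD cv.1 PySem.Set.empty
      = ((PySem.Dict.ofList vary).items.filter (fun pc => pc.2 == cv.1)).map Prod.fst := hchar
  rw [List.foldl_filterMap]
  refine Eq.trans ?_ (PySem.List.foldl_congr_mem (PySem.Dict.ofList vary).items _
      (fun st pc => if (pc.2 == cv.1) = true then f st pc.1 else st) st ?_).symm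
  · rw [foldl_guard_filter f cv.1 (PySem.Dict.ofList vary).items st, ← hchar']
    cases hg : ((PySem.Dict.ofList vary).items.foldl
        (fun d pc => d.insert pc.2 (PySem.Set.add (d.getD pc.2 PySem.Set.empty) pc.1))
        PySem.Dict.empty).get? cv.1 with
    | none =>
      rw [PySem.Dict.getD_of_get?_eq_none _ _ hg]
      rfl
    | some props =>
      rw [PySem.Dict.getD_of_get?_eq_some _ _ hg]
  · intro st pc _
    by_cases hg : (pc.2 == cv.1) = true
    · simp only [if_pos hg, hf]
      cases h1 : smD.get? pc.1 with
      | none => rfl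
      | some m =>
        by_cases he : (PySem.Dict.ofList m).items ≠ []
        · simp only [Option.bind_some, if_pos he]
          cases (PySem.Dict.ofList m).get? cv.2 <;> rfl
        · simp only [Option.bind_some, if_neg he]
    · simp only [if_neg hg]

-- ===== VERDICT (by name: the statement is the Claim_ definition above) =====
theorem get_group_styles_spec : Claim_equal_get_group_styles := by
  intro groups values vary style_maps _
  unfold Spec_get_group_styles get_group_styles get_group_styles_alt
  by_cases h : groups = [] ∨ values = []
  · rw [if_pos h, if_pos h]
  · rw [if_neg h, if_neg h]
    refine congrArg PySem.Dict.items ?_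
    -- `Dict.ofList events` is by definition the fold of `insert` over `events`
    exact (PySem.List.foldl_congr_mem (groups.zip values) _ _ PySem.Dict.empty
        (fun st cv _ => step_eq vary (PySem.Dict.ofList style_maps) cv st)).trans
      List.foldl_flatMap.symm
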